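-- pv_equiv track=rewrite | github.com/sirebh-a11y/certi_nt | backend/app/modules/document_reader/service.py | _choose_best_aluminium_bozen_cast
-- ===== SOURCE A (Python) =====
-- def _choose_best_aluminium_bozen_cast(casts: list[str], fallback: str | None) -> str | None:
--     if not casts:
--         return fallback
--     normalized_counts: dict[str, int] = {}
--     preferred_by_key: dict[str, str] = {}
--     for cast in casts:
--         normalized = cast.replace("0", "O")
--         normalized_counts[normalized] = normalized_counts.get(normalized, 0) + 1
--         current = preferred_by_key.get(normalized)
--         if current is None or _cast_quality_score(cast) > _cast_quality_score(current):
--             preferred_by_key[normalized] = cast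
--     best_key = max(normalized_counts.items(), key=lambda item: (item[1], _cast_quality_score(preferred_by_key[item[0]])))[0]
--     return preferred_by_key[best_key]
--
-- def _cast_quality_score(value: str) -> tuple[int, int]:
--     alpha_count = sum(1 for char in value if char.isalpha())
--     return (alpha_count, len(value))
-- ===== SOURCE B (Python) =====
-- def _choose_best_aluminium_bozen_cast(casts, fallback):
--     if not casts:
--         return fallback
--     counts = {}
--     first_seen = {}
--     for position, cast in enumerate(casts):
--         key = cast.replace("0", "O")
--         counts[key] = counts.get(key, 0) + 1
--         first_seen.setdefault(key, position)
--
--     def rank(cast):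
--         key = cast.replace("0", "O")
--         alpha = sum(1 for ch in cast if ch.isalpha())
--         return (counts[key], alpha, len(cast), -first_seen[key])
--
--     return max(casts, key=rank)
-- ===== Notes on version B (the rewrite author's own statement) =====
-- stated objective: alternative
-- what changed: A maintains per-key count and running-best-representative dicts and then takes a max over the dict items with a nested (count, score) key; B never builds a representative per key at all: it records counts and first-occurrence positions in one pass and then selects directly among the original casts with a single flattened composite key (count, alpha, length, -first_seen), which linearizes A's two-level tie-breaking into one max over the input list.
import Mathlib
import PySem

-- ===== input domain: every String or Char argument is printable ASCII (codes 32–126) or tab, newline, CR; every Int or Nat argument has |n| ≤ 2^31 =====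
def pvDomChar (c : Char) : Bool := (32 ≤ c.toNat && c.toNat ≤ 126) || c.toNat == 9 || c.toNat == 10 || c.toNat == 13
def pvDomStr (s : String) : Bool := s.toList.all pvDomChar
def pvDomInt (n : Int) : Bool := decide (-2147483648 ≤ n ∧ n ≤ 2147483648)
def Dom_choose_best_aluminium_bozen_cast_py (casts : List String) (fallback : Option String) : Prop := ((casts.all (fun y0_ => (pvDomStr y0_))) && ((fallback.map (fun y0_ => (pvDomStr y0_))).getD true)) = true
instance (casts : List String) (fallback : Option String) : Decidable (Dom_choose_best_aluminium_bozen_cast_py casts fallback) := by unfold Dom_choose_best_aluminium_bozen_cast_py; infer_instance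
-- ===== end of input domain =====

-- B replaces A's per-key dicts (count + running best representative, reduced by a max over dict
-- items with a nested key) by a selection made directly over the input casts with one flattened
-- composite key (count, alpha, length, -first_seen); same result, same cost class.

-- ===== PORT A =====
-- the normalized key cast.replace("0", "O") (appears in both programs)
def pvNorm (cast : String) : String := PySem.Str.replace cast "0" "O"

-- module helper _cast_quality_score (used by both programs)
def pvScore (value : String) : Int × Int :=
  (value.toList.foldl (fun acc c => if PySem.Chars.isalpha c then acc + 1 else acc) 0,
   PySem.Str.len value)

-- Python '>' on the 2-tuple quality scores (lexicographic)
def pvGT2 (a b : Int × Int) : Bool :=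
  decide (b.1 < a.1) || (decide (a.1 = b.1) && decide (b.2 < a.2))

-- Python '>' on the nested (count, score) tuple key of A's final max (lexicographic)
def pvGT3 (a b : Int × (Int × Int)) : Bool :=
  decide (b.1 < a.1) || (decide (a.1 = b.1) && pvGT2 a.2 b.2)

-- the body of A's 'for cast in casts' loop over (normalized_counts, preferred_by_key)
def pvStepA (st : PySem.Dict String Int × PySem.Dict String String) (cast : String) :
    PySem.Dict String Int × PySem.Dict String String :=
  let normalized := pvNorm cast
  let counts := st.1.insert normalized (st.1.getD normalized 0 + 1)
  let pref :=
    match st.2.get? normalized with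
    | none => st.2.insert normalized cast
    | some current =>
        if pvGT2 (pvScore cast) (pvScore current) then st.2.insert normalized cast else st.2
  (counts, pref)

def choose_best_aluminium_bozen_cast_py (casts : List String) (fallback : Option String) :
    Option String :=
  if casts = [] then fallback
  else
    let st := casts.foldl pvStepA (PySem.Dict.empty, PySem.Dict.empty)
    match st.1.items with
    | [] => fallback   -- unreachable (casts ≠ []): Python's max would raise here
    | it :: rest =>
        let fA := fun (item : String × Int) => (item.2, pvScore (st.2.getD item.1 ""))
        let best := rest.foldl (fun b y => if pvGT3 (fA y) (fA b) then y else b) it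
        some (st.2.getD best.1 "")   -- preferred_by_key[best_key]; the key is always present

-- ===== PORT B =====
-- the body of B's 'for position, cast in enumerate(casts)' pass over (counts, first_seen)
def pvStepC (st : PySem.Dict String Int × PySem.Dict String Int) (p : Int × String) :
    PySem.Dict String Int × PySem.Dict String Int :=
  let key := pvNorm p.2
  (st.1.insert key (st.1.getD key 0 + 1), st.2.setdefault key p.1)

-- Python '>' on rank's flat 4-tuple (lexicographic)
def pvGT4 (a b : Int × Int × Int × Int) : Bool :=
  decide (b.1 < a.1) || (decide (a.1 = b.1) &&
    (decide (b.2.1 < a.2.1) || (decide (a.2.1 = b.2.1) &&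
      (decide (b.2.2.1 < a.2.2.1) || (decide (a.2.2.1 = b.2.2.1) && decide (b.2.2.2 < a.2.2.2))))))

-- rank(cast); counts[key]/first_seen[key] never miss when rank is called, getD is exact there
def pvRank (counts first_seen : PySem.Dict String Int) (cast : String) : Int × Int × Int × Int :=
  (counts.getD (pvNorm cast) 0, (pvScore cast).1, (pvScore cast).2,
   -(first_seen.getD (pvNorm cast) 0))

def choose_best_aluminium_bozen_cast_py_alt (casts : List String) (fallback : Option String) :
    Option String :=
  match casts with
  | [] => fallback
  | x :: t =>
      let st := (PySem.List.enumerate (x :: t)).foldl pvStepC (PySem.Dict.empty, PySem.Dict.empty)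
      -- max(casts, key=rank): running maximum, first element wins ties
      some (t.foldl (fun b y => if pvGT4 (pvRank st.1 st.2 y) (pvRank st.1 st.2 b) then y else b) x)

-- ===== PRECONDITION & SPEC =====
def Spec_choose_best_aluminium_bozen_cast_py (casts : List String) (fallback : Option String) (out : Option String) : Prop := out = choose_best_aluminium_bozen_cast_py_alt casts fallback
instance (casts : List String) (fallback : Option String) (out : Option String) : Decidable (Spec_choose_best_aluminium_bozen_cast_py casts fallback out) := by unfold Spec_choose_best_aluminium_bozen_cast_py; infer_instance

-- ===== CLAIM (what is proved, stated in full; the proofs are below) =====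
def Claim_equal_choose_best_aluminium_bozen_cast_py : Prop := ∀ (casts : List String) (fallback : Option String), Dom_choose_best_aluminium_bozen_cast_py casts fallback → Spec_choose_best_aluminium_bozen_cast_py casts fallback (choose_best_aluminium_bozen_cast_py casts fallback)

-- ===== LEMMAS AND PROOFS =====

-- running argmax with strict '>' (first element wins ties) and the running maximum of keys
def pvSel {α K : Type} (gt : K → K → Bool) (f : α → K) (a : α) (l : List α) : α :=
  l.foldl (fun b y => if gt (f y) (f b) then y else b) a

def pvKM {K : Type} (gt : K → K → Bool) (k : K) (ks : List K) : K :=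
  ks.foldl (fun m j => if gt j m then j else m) k

-- "≤ is transitive" for a Bool relation that is transitive and connected
lemma pvLe_trans {K : Type} (gt : K → K → Bool)
    (htr : ∀ a b c, gt a b = true → gt b c = true → gt a c = true)
    (hco : ∀ a b, gt a b = false → gt b a = false → a = b)
    {a b c : K} (hab : gt a b = false) (hbc : gt b c = false) : gt a c = false := by
  by_contra h
  have hac : gt a c = true := by revert h; cases gt a c <;> simp
  cases hba : gt b a with
  | true => exact absurd (htr b a c hba hac) (by simp [hbc])
  | false => exact absurd (hco a b hab hba ▸ hac) (by simp [hbc])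

lemma pvKM_ge_init {K : Type} (gt : K → K → Bool)
    (hirr : ∀ k, gt k k = false)
    (htr : ∀ a b c, gt a b = true → gt b c = true → gt a c = true) :
    ∀ (ks : List K) (k : K), gt k (pvKM gt k ks) = false := by
  intro ks
  induction ks with
  | nil => intro k; exact hirr k
  | cons j t ih =>
      intro k
      show gt k (pvKM gt (if gt j k then j else k) t) = false
      by_cases hj : gt j k = true
      · rw [if_pos hj]
        by_contra h
        have h' : gt k (pvKM gt j t) = true := by revert h; cases gt k (pvKM gt j t) <;> simp
        have := htr j k (pvKM gt j t) hj h'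
        exact absurd this (by simp [ih j])
      · rw [if_neg hj]; exact ih k

lemma pvKM_ge_mem {K : Type} (gt : K → K → Bool)
    (hirr : ∀ k, gt k k = false)
    (htr : ∀ a b c, gt a b = true → gt b c = true → gt a c = true)
    (hco : ∀ a b, gt a b = false → gt b a = false → a = b) :
    ∀ (ks : List K) (k : K) (j : K), j ∈ ks → gt j (pvKM gt k ks) = false := by
  intro ks
  induction ks with
  | nil => intro k j hj; cases hj
  | cons j0 t ih =>
      intro k j hj
      show gt j (pvKM gt (if gt j0 k then j0 else k) t) = false
      rcases List.mem_cons.mp hj with rfl | hj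
      · have h1 : gt j (if gt j k then j else k) = false := by
          by_cases h : gt j k = true
          · rw [if_pos h]; exact hirr j
          · rw [if_neg h]; revert h; cases gt j k <;> simp
        exact pvLe_trans gt htr hco h1 (pvKM_ge_init gt hirr htr t _)
      · exact ih _ j hj

lemma pvKM_mem {K : Type} (gt : K → K → Bool) :
    ∀ (ks : List K) (k : K), pvKM gt k ks = k ∨ pvKM gt k ks ∈ ks := by
  intro ks
  induction ks with
  | nil => intro k; exact Or.inl rfl
  | cons j t ih =>
      intro k
      have hred : pvKM gt k (j :: t) = pvKM gt (if gt j k then j else k) t := rfl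
      rw [hred]
      rcases ih (if gt j k then j else k) with h | h
      · by_cases hj : gt j k = true
        · rw [h, if_pos hj]; exact Or.inr (List.mem_cons_self ..)
        · rw [h, if_neg hj]; exact Or.inl rfl
      · exact Or.inr (List.mem_cons_of_mem _ h)

lemma pvSel_key {α K : Type} (gt : K → K → Bool) (f : α → K) :
    ∀ (l : List α) (a : α), f (pvSel gt f a l) = pvKM gt (f a) (l.map f) := by
  intro l
  induction l with
  | nil => intro a; rfl
  | cons y t ih =>
      intro a
      show f (pvSel gt f (if gt (f y) (f a) then y else a) t)
          = pvKM gt (if gt (f y) (f a) then f y else f a) (t.map f)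
      by_cases h : gt (f y) (f a) = true
      · rw [if_pos h, if_pos h, ih]
      · rw [if_neg h, if_neg h, ih]

lemma pvSel_mem {α K : Type} (gt : K → K → Bool) (f : α → K) :
    ∀ (l : List α) (a : α), pvSel gt f a l ∈ a :: l := by
  intro l
  induction l with
  | nil => intro a; simp [pvSel]
  | cons y t ih =>
      intro a
      show pvSel gt f (if gt (f y) (f a) then y else a) t ∈ a :: y :: t
      rcases List.mem_cons.mp (ih (if gt (f y) (f a) then y else a)) with h | h
      · rw [h]
        by_cases hc : gt (f y) (f a) = true
        · rw [if_pos hc]; simp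
        · rw [if_neg hc]; simp
      · simp [h]

lemma pvSel_congr {α K : Type} (gt : K → K → Bool) (f f' : α → K) :
    ∀ (l : List α) (a : α), (∀ c ∈ l, f c = f' c) → f a = f' a →
      pvSel gt f a l = pvSel gt f' a l := by
  intro l
  induction l with
  | nil => intro a _ _; rfl
  | cons y t ih =>
      intro a hl ha
      have hy : f y = f' y := hl y (by simp)
      show pvSel gt f (if gt (f y) (f a) then y else a) t
          = pvSel gt f' (if gt (f' y) (f' a) then y else a) t
      rw [← hy, ← ha]
      by_cases h : gt (f y) (f a) = true
      · simp only [if_pos h]; exact ih _ (fun c hc => hl c (by simp [hc])) hy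
      · simp only [if_neg h]; exact ih _ (fun c hc => hl c (by simp [hc])) ha

lemma pvSel_append_singleton {α K : Type} (gt : K → K → Bool) (f : α → K) (a : α) (l : List α) (c : α) :
    pvSel gt f a (l ++ [c])
      = if gt (f c) (f (pvSel gt f a l)) then c else pvSel gt f a l := by
  simp [pvSel, List.foldl_append]

-- the fold with strict '>' finds the FIRST element whose key is the running maximum
lemma pvSel_find {α K : Type} [DecidableEq K] (gt : K → K → Bool) (f : α → K)
    (hirr : ∀ k, gt k k = false)
    (htr : ∀ a b c, gt a b = true → gt b c = true → gt a c = true)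
    (hco : ∀ a b, gt a b = false → gt b a = false → a = b) :
    ∀ (l : List α) (a : α),
      (a :: l).find? (fun z => decide (f z = pvKM gt (f a) (l.map f))) = some (pvSel gt f a l) := by
  intro l
  induction l with
  | nil => intro a; simp [pvSel, pvKM]
  | cons y t ih =>
      intro a
      by_cases h : gt (f y) (f a) = true
      · have hM : pvKM gt (f a) ((y :: t).map f) = pvKM gt (f y) (t.map f) := by
          show pvKM gt (if gt (f y) (f a) then f y else f a) (t.map f) = _
          simp only [if_pos h]
        have hsel : pvSel gt f a (y :: t) = pvSel gt f y t := by
          show pvSel gt f (if gt (f y) (f a) then y else a) t = _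
          simp only [if_pos h]
        have hya := pvKM_ge_init gt hirr htr (t.map f) (f y)
        have hane : (decide (f a = pvKM gt (f y) (t.map f))) = false := by
          cases hb : decide (f a = pvKM gt (f y) (t.map f)) with
          | false => rfl
          | true =>
              exfalso
              have hx : f a = pvKM gt (f y) (t.map f) := of_decide_eq_true hb
              rw [← hx] at hya
              simp [hya] at h
        rw [hM, hsel, List.find?_cons, hane]
        exact ih y
      · have hM : pvKM gt (f a) ((y :: t).map f) = pvKM gt (f a) (t.map f) := by
          show pvKM gt (if gt (f y) (f a) then f y else f a) (t.map f) = _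
          simp only [if_neg h]
        have hsel : pvSel gt f a (y :: t) = pvSel gt f a t := by
          show pvSel gt f (if gt (f y) (f a) then y else a) t = _
          simp only [if_neg h]
        rw [hM, hsel]
        by_cases hae : f a = pvKM gt (f a) (t.map f)
        · rw [List.find?_cons_of_pos (by simpa using hae)]
          have hfind := ih a
          rw [List.find?_cons_of_pos (by simpa using hae)] at hfind
          exact hfind
        · have hyne : (decide (f y = pvKM gt (f a) (t.map f))) = false := by
            cases hb : decide (f y = pvKM gt (f a) (t.map f)) with
            | false => rfl
            | true =>
                exfalso
                have hyM : f y = pvKM gt (f a) (t.map f) := of_decide_eq_true hb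
                have h1 : gt (pvKM gt (f a) (t.map f)) (f a) = false := by
                  rw [← hyM]; simpa using h
                exact hae (hco _ _ (pvKM_ge_init gt hirr htr (t.map f) (f a)) h1)
          have hane : (decide (f a = pvKM gt (f a) (t.map f))) = false := by
            cases hb : decide (f a = pvKM gt (f a) (t.map f)) with
            | false => rfl
            | true => exact absurd (of_decide_eq_true hb) hae
          rw [List.find?_cons, hane, List.find?_cons, hyne]
          have hfind := ih a
          rw [List.find?_cons, hane] at hfind
          exact hfind

-- concrete comparison facts
lemma pvGT2_irrefl (a : Int × Int) : pvGT2 a a = false := by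
  simp [pvGT2]

lemma pvGT2_trans (a b c : Int × Int) (h1 : pvGT2 a b = true) (h2 : pvGT2 b c = true) :
    pvGT2 a c = true := by
  rcases a with ⟨a1, a2⟩; rcases b with ⟨b1, b2⟩; rcases c with ⟨c1, c2⟩
  simp only [pvGT2, Bool.or_eq_true, Bool.and_eq_true, decide_eq_true_eq] at *
  omega

lemma pvGT2_conn (a b : Int × Int) (h1 : pvGT2 a b = false) (h2 : pvGT2 b a = false) : a = b := by
  rcases a with ⟨a1, a2⟩; rcases b with ⟨b1, b2⟩
  simp only [pvGT2, Bool.or_eq_false_iff, Bool.and_eq_false_iff, decide_eq_false_iff_not,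
    not_lt, Prod.mk.injEq] at *
  rcases h1 with ⟨h1a, h1b⟩; rcases h2 with ⟨h2a, h2b⟩
  constructor <;> omega

lemma pvGT4_irrefl (a : Int × Int × Int × Int) : pvGT4 a a = false := by
  simp [pvGT4]

lemma pvGT4_trans (a b c : Int × Int × Int × Int)
    (h1 : pvGT4 a b = true) (h2 : pvGT4 b c = true) : pvGT4 a c = true := by
  obtain ⟨a1, a2, a3, a4⟩ := a; obtain ⟨b1, b2, b3, b4⟩ := b; obtain ⟨c1, c2, c3, c4⟩ := c
  simp only [pvGT4, Bool.or_eq_true, Bool.and_eq_true, decide_eq_true_eq] at *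
  omega

lemma pvGT4_conn (a b : Int × Int × Int × Int)
    (h1 : pvGT4 a b = false) (h2 : pvGT4 b a = false) : a = b := by
  obtain ⟨a1, a2, a3, a4⟩ := a; obtain ⟨b1, b2, b3, b4⟩ := b
  have h1' : ¬ (pvGT4 (a1, a2, a3, a4) (b1, b2, b3, b4) = true) := by simp [h1]
  have h2' : ¬ (pvGT4 (b1, b2, b3, b4) (a1, a2, a3, a4) = true) := by simp [h2]
  simp only [pvGT4, Bool.or_eq_true, Bool.and_eq_true, decide_eq_true_eq] at h1' h2'
  simp only [Prod.mk.injEq]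
  omega

lemma pvGT4_eq_gt3_of_lt (n1 s1 s2 e1 n2 t1 t2 e2 : Int) (h : e1 < e2) :
    pvGT4 (n1, s1, s2, e1) (n2, t1, t2, e2) = pvGT3 (n1, (s1, s2)) (n2, (t1, t2)) := by
  rw [Bool.eq_iff_iff]
  simp only [pvGT4, pvGT3, pvGT2, Bool.or_eq_true, Bool.and_eq_true, decide_eq_true_eq]
  omega

lemma pvGT4_false_of_gt2_false (n e s1 s2 t1 t2 : Int)
    (h : pvGT2 (s1, s2) (t1, t2) = false) :
    pvGT4 (n, s1, s2, e) (n, t1, t2, e) = false := by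
  have h' : ¬ (pvGT2 (s1, s2) (t1, t2) = true) := by simp [h]
  simp only [pvGT2, Bool.or_eq_true, Bool.and_eq_true, decide_eq_true_eq] at h'
  cases hb : pvGT4 (n, s1, s2, e) (n, t1, t2, e) with
  | false => rfl
  | true =>
      exfalso
      simp only [pvGT4, Bool.or_eq_true, Bool.and_eq_true, decide_eq_true_eq] at hb
      omega

-- converting A's 3-component fold to the 4-component fold along a strictly ext-decreasing list
lemma pv_fold34 {α : Type} (f3 : α → Int × (Int × Int)) (ext : α → Int) :
    ∀ (l : List α) (a : α), (∀ y ∈ l, ext y < ext a) →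
      l.Pairwise (fun u v => ext v < ext u) →
      pvSel pvGT3 f3 a l
        = pvSel pvGT4 (fun z => ((f3 z).1, (f3 z).2.1, (f3 z).2.2, ext z)) a l := by
  intro l
  induction l with
  | nil => intro a _ _; rfl
  | cons y t ih =>
      intro a hlt hpw
      have hy : ext y < ext a := hlt y (by simp)
      have hcond : pvGT4 ((f3 y).1, (f3 y).2.1, (f3 y).2.2, ext y)
          ((f3 a).1, (f3 a).2.1, (f3 a).2.2, ext a) = pvGT3 (f3 y) (f3 a) := by
        rw [pvGT4_eq_gt3_of_lt _ _ _ _ _ _ _ _ hy]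
      show pvSel pvGT3 f3 (if pvGT3 (f3 y) (f3 a) then y else a) t = pvSel pvGT4 _ (if pvGT4 _ _ then y else a) t
      rw [hcond]
      rcases List.pairwise_cons.mp hpw with ⟨hyt, hpt⟩
      by_cases h : pvGT3 (f3 y) (f3 a) = true
      · simp only [if_pos h]; exact ih y hyt hpt
      · simp only [if_neg h]
        exact ih a (fun z hz => lt_trans (hyt z hz) hy) hpt

-- find? plumbing
lemma pv_find?_congr {α : Type} (p q : α → Bool) :
    ∀ (l : List α), (∀ z ∈ l, p z = q z) → l.find? p = l.find? q := by
  intro l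
  induction l with
  | nil => intro _; rfl
  | cons x t ih =>
      intro h
      rw [List.find?_cons, List.find?_cons, h x (by simp)]
      cases q x
      · exact ih (fun z hz => h z (by simp [hz]))
      · rfl

lemma pv_find?_filter {α : Type} (p q : α → Bool) :
    ∀ (l : List α), (l.filter p).find? q = l.find? (fun z => p z && q z) := by
  intro l
  induction l with
  | nil => rfl
  | cons x t ih =>
      cases hp : p x <;> cases hq : q x <;>
        simp [hp, hq, ih]

-- semantic views shared by the two programs
def pvN (casts : List String) : List String := casts.map pvNorm
def pvCnt (casts : List String) (k : String) : Int := ((pvN casts).count k : Int)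
def pvFst (casts : List String) (k : String) : Int := (((pvN casts).idxOf k : Nat) : Int)
def pvGroup (casts : List String) (k : String) : List String :=
  casts.filter (fun c => pvNorm c == k)
def pvRep (casts : List String) (k : String) : String :=
  match pvGroup casts k with
  | [] => ""
  | gx :: g => pvSel pvGT2 pvScore gx g
def pvKey (casts : List String) (c : String) : Int × Int × Int × Int :=
  (pvCnt casts (pvNorm c), (pvScore c).1, (pvScore c).2, -pvFst casts (pvNorm c))
def pvI3 (casts : List String) (item : String × Int) : Int × (Int × Int) :=
  (item.2, pvScore (pvRep casts item.1))
def pvIKey (casts : List String) (item : String × Int) : Int × Int × Int × Int :=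
  (item.2, (pvScore (pvRep casts item.1)).1, (pvScore (pvRep casts item.1)).2, -pvFst casts item.1)

-- splitting the paired folds into their independent components
def pvFC (d : PySem.Dict String Int) (cast : String) : PySem.Dict String Int :=
  d.insert (pvNorm cast) (d.getD (pvNorm cast) 0 + 1)
def pvFP (d : PySem.Dict String String) (cast : String) : PySem.Dict String String :=
  match d.get? (pvNorm cast) with
  | none => d.insert (pvNorm cast) cast
  | some current =>
      if pvGT2 (pvScore cast) (pvScore current) then d.insert (pvNorm cast) cast else d
def pvFCp (d : PySem.Dict String Int) (p : Int × String) : PySem.Dict String Int :=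
  d.insert (pvNorm p.2) (d.getD (pvNorm p.2) 0 + 1)
def pvFS (d : PySem.Dict String Int) (p : Int × String) : PySem.Dict String Int :=
  d.setdefault (pvNorm p.2) p.1

lemma pv_foldA_split (casts : List String) :
    casts.foldl pvStepA (PySem.Dict.empty, PySem.Dict.empty)
      = (casts.foldl pvFC PySem.Dict.empty, casts.foldl pvFP PySem.Dict.empty) := by
  have h : pvStepA = fun st cast => (pvFC st.1 cast, pvFP st.2 cast) := rfl
  rw [h, PySem.List.foldl_prod_mk (f := pvFC) (g := pvFP)]

lemma pv_foldC_split (l : List (Int × String)) :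
    l.foldl pvStepC (PySem.Dict.empty, PySem.Dict.empty)
      = (l.foldl pvFCp PySem.Dict.empty, l.foldl pvFS PySem.Dict.empty) := by
  have h : pvStepC = fun st p => (pvFCp st.1 p, pvFS st.2 p) := rfl
  rw [h, PySem.List.foldl_prod_mk (f := pvFCp) (g := pvFS)]

lemma pv_countsA (casts : List String) :
    casts.foldl pvFC PySem.Dict.empty = PySem.Dict.counter (pvN casts) := by
  have h1 : casts.foldl pvFC PySem.Dict.empty
      = (casts.map pvNorm).foldl (fun d x => d.insert x (d.getD x 0 + 1)) PySem.Dict.empty := by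
    rw [List.foldl_map]; rfl
  rw [h1, PySem.Dict.foldl_insert_getD_add_one_eq_counter]; rfl

lemma pv_enum_norms (casts : List String) :
    (PySem.List.enumerate casts).map (fun p => pvNorm p.2) = pvN casts := by
  have h : (fun p : Int × String => pvNorm p.2)
      = pvNorm ∘ (fun p : Int × String => p.2) := rfl
  rw [h, ← List.map_map, PySem.List.map_snd_enumerate]; rfl

lemma pv_countsB (casts : List String) :
    (PySem.List.enumerate casts).foldl pvFCp PySem.Dict.empty
      = PySem.Dict.counter (pvN casts) := by
  have h1 : (PySem.List.enumerate casts).foldl pvFCp PySem.Dict.empty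
      = ((PySem.List.enumerate casts).map (fun p => pvNorm p.2)).foldl
          (fun d x => d.insert x (d.getD x 0 + 1)) PySem.Dict.empty := by
    rw [List.foldl_map]; rfl
  rw [h1, pv_enum_norms, PySem.Dict.foldl_insert_getD_add_one_eq_counter]

-- group facts
lemma pv_mem_group_self {casts : List String} {c : String} (h : c ∈ casts) :
    c ∈ pvGroup casts (pvNorm c) := by
  simp [pvGroup, List.mem_filter, h]

lemma pv_of_mem_group {casts : List String} {k z : String} (h : z ∈ pvGroup casts k) :
    z ∈ casts ∧ pvNorm z = k := by
  simpa [pvGroup, List.mem_filter] using h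

lemma pv_group_ne_nil {casts : List String} {k : String} (h : k ∈ pvN casts) :
    pvGroup casts k ≠ [] := by
  obtain ⟨c, hc, rfl⟩ := List.mem_map.mp h
  intro he
  exact absurd (pv_mem_group_self hc) (by simp [he])

lemma pv_norm_rep {casts : List String} {k : String} (hk : k ∈ pvN casts) :
    pvNorm (pvRep casts k) = k ∧ pvRep casts k ∈ casts := by
  have hne := pv_group_ne_nil hk
  rcases hg : pvGroup casts k with _ | ⟨gx, g⟩
  · exact absurd hg hne
  · have hrep : pvRep casts k = pvSel pvGT2 pvScore gx g := by simp [pvRep, hg]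
    have hmem : pvRep casts k ∈ pvGroup casts k := by
      rw [hg, hrep]; exact pvSel_mem _ _ _ _
    obtain ⟨h1, h2⟩ := pv_of_mem_group hmem
    exact ⟨h2, h1⟩

lemma pv_score_rep_max {casts : List String} {k z : String} (hz : z ∈ pvGroup casts k) :
    pvGT2 (pvScore z) (pvScore (pvRep casts k)) = false := by
  rcases hg : pvGroup casts k with _ | ⟨gx, g⟩
  · rw [hg] at hz; cases hz
  · have hrep : pvRep casts k = pvSel pvGT2 pvScore gx g := by simp [pvRep, hg]
    rw [hrep, pvSel_key pvGT2 pvScore g gx]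
    rw [hg] at hz
    rcases List.mem_cons.mp hz with rfl | hz'
    · exact pvKM_ge_init pvGT2 pvGT2_irrefl pvGT2_trans _ _
    · exact pvKM_ge_mem pvGT2 pvGT2_irrefl pvGT2_trans pvGT2_conn _ _ _
        (List.mem_map_of_mem hz')

lemma pv_fst_inj {casts : List String} {k1 k2 : String}
    (h1 : k1 ∈ pvN casts) (h2 : k2 ∈ pvN casts)
    (h : pvFst casts k1 = pvFst casts k2) : k1 = k2 := by
  have hn : (pvN casts).idxOf k1 = (pvN casts).idxOf k2 := by
    simp only [pvFst, Nat.cast_inj] at h; exact h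
  have hlt1 := List.idxOf_lt_length_of_mem h1
  have hlt2 := List.idxOf_lt_length_of_mem h2
  have e1 : (pvN casts)[(pvN casts).idxOf k1] = k1 := List.getElem_idxOf hlt1
  have e2 : (pvN casts)[(pvN casts).idxOf k2] = k2 := List.getElem_idxOf hlt2
  rw [← e1, ← e2]
  congr 1

-- A's preferred_by_key dict: lookup = running best of the key's group
lemma pv_prefA (casts : List String) (k : String) :
    (casts.foldl pvFP PySem.Dict.empty).get? k
      = match pvGroup casts k with
        | [] => none
        | gx :: g => some (pvSel pvGT2 pvScore gx g) := by
  induction casts using List.reverseRecOn with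
  | nil => simp [pvGroup, PySem.Dict.get?_empty]
  | append_singleton p c ih =>
      rw [List.foldl_append, List.foldl_cons, List.foldl_nil]
      have hfp_none : ∀ d : PySem.Dict String String, d.get? (pvNorm c) = none →
          pvFP d c = d.insert (pvNorm c) c := by
        intro d h; unfold pvFP; rw [h]
      have hfp_some : ∀ (d : PySem.Dict String String) (cur : String),
          d.get? (pvNorm c) = some cur →
          pvFP d c = if pvGT2 (pvScore c) (pvScore cur) then d.insert (pvNorm c) c else d := by
        intro d cur h; unfold pvFP; rw [h]
      by_cases hk : pvNorm c = k
      · subst hk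
        have hgrp : pvGroup (p ++ [c]) (pvNorm c) = pvGroup p (pvNorm c) ++ [c] := by
          simp [pvGroup, List.filter_append]
        rw [hgrp]
        rcases hg : pvGroup p (pvNorm c) with _ | ⟨gx, g⟩
        · have hnone : (p.foldl pvFP PySem.Dict.empty).get? (pvNorm c) = none := by
            rw [ih, hg]
          rw [hfp_none _ hnone, PySem.Dict.get?_insert_self]
          simp [pvSel]
        · have hsome : (p.foldl pvFP PySem.Dict.empty).get? (pvNorm c)
              = some (pvSel pvGT2 pvScore gx g) := by rw [ih, hg]
          rw [hfp_some _ _ hsome]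
          show _ = some (pvSel pvGT2 pvScore gx (g ++ [c]))
          rw [pvSel_append_singleton]
          by_cases hgt : pvGT2 (pvScore c) (pvScore (pvSel pvGT2 pvScore gx g)) = true
          · rw [if_pos hgt, if_pos hgt, PySem.Dict.get?_insert_self]
          · rw [if_neg hgt, if_neg hgt, hsome]
      · have hgrp : pvGroup (p ++ [c]) k = pvGroup p k := by
          simp [pvGroup, List.filter_append, hk]
        rw [hgrp, ← ih]
        have hne : k ≠ pvNorm c := fun he => hk he.symm
        cases hget : (p.foldl pvFP PySem.Dict.empty).get? (pvNorm c) with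
        | none => rw [hfp_none _ hget]; exact PySem.Dict.get?_insert_of_ne _ _ hne
        | some cur =>
            rw [hfp_some _ _ hget]
            by_cases hgt : pvGT2 (pvScore c) (pvScore cur) = true
            · rw [if_pos hgt]; exact PySem.Dict.get?_insert_of_ne _ _ hne
            · rw [if_neg hgt]

lemma pv_getD_pref {casts : List String} {k : String} (hk : k ∈ pvN casts) :
    (casts.foldl pvFP PySem.Dict.empty).getD k "" = pvRep casts k := by
  rw [PySem.Dict.getD_eq_get?_getD, pv_prefA]
  rcases hg : pvGroup casts k with _ | ⟨gx, g⟩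
  · exact absurd hg (pv_group_ne_nil hk)
  · simp [pvRep, hg]

-- B's first_seen dict
lemma pv_fs (k : String) :
    ∀ (l : List (Int × String)) (d : PySem.Dict String Int),
      (l.foldl pvFS d).get? k
        = match d.get? k with
          | some v => some v
          | none => (l.find? (fun p => pvNorm p.2 == k)).map (fun p => p.1) := by
  intro l
  induction l with
  | nil => intro d; rw [List.foldl_nil]; cases d.get? k <;> rfl
  | cons p t ih =>
      intro d
      rw [List.foldl_cons, ih]
      by_cases he : pvNorm p.2 = k
      · have h1 : (pvFS d p).get? k = some ((d.get? k).getD p.1) := by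
          show (d.setdefault (pvNorm p.2) p.1).get? k = _
          rw [he, PySem.Dict.get?_setdefault_self]
        rw [h1, List.find?_cons_of_pos (by simp [he])]
        cases d.get? k <;> simp
      · have h1 : (pvFS d p).get? k = d.get? k := by
          show (d.setdefault (pvNorm p.2) p.1).get? k = _
          exact PySem.Dict.get?_setdefault_of_ne _ _ (fun hx => he hx.symm)
        rw [h1, List.find?_cons, (show (pvNorm p.2 == k) = false by simp [he])]

lemma pv_find_enum (k : String) :
    ∀ (l : List String) (s : Int),
      ((PySem.List.enumerate l s).find? (fun p => pvNorm p.2 == k)).map (fun p => p.1)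
        = if k ∈ pvN l then some (s + (((pvN l).idxOf k : Nat) : Int)) else none := by
  intro l
  induction l with
  | nil => intro s; simp [PySem.List.enumerate_nil, pvN]
  | cons x t ih =>
      intro s
      rw [PySem.List.enumerate_cons]
      by_cases he : pvNorm x = k
      · rw [List.find?_cons_of_pos (by simp [he])]
        have hmem : k ∈ pvN (x :: t) := by
          show k ∈ pvNorm x :: pvN t
          rw [he]
          exact List.mem_cons_self ..
        rw [if_pos hmem]
        have hidx : (pvN (x :: t)).idxOf k = 0 := by
          show (pvNorm x :: pvN t).idxOf k = 0
          rw [he]; exact List.idxOf_cons_self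
        rw [hidx]
        simp
      · rw [List.find?_cons, (show (pvNorm x == k) = false by simp [he]), ih (s + 1)]
        have hiff : k ∈ pvN (x :: t) ↔ k ∈ pvN t := by
          show k ∈ pvNorm x :: pvN t ↔ _
          rw [List.mem_cons]
          constructor
          · rintro (h | h)
            · exact absurd h.symm he
            · exact h
          · exact Or.inr
        by_cases hmem : k ∈ pvN t
        · rw [if_pos hmem, if_pos (hiff.mpr hmem)]
          have hidx : (pvN (x :: t)).idxOf k = (pvN t).idxOf k + 1 := by
            show (pvNorm x :: pvN t).idxOf k = _
            exact List.idxOf_cons_ne _ he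
          rw [hidx]
          congr 1
          push_cast
          ring
        · rw [if_neg hmem, if_neg (fun hx => hmem (hiff.mp hx))]

-- the dedup list of normalized keys is ordered by first occurrence
lemma pv_pairwise_idxOf : ∀ (xs : List String),
    (PySem.Set.ofList xs).Pairwise (fun a b => xs.idxOf a < xs.idxOf b) := by
  intro xs
  induction xs using List.reverseRecOn with
  | nil => simp [PySem.Set.ofList]
  | append_singleton p y ih =>
      have hof : PySem.Set.ofList (p ++ [y]) = PySem.Set.add (PySem.Set.ofList p) y := by
        simp [PySem.Set.ofList_eq_foldl, List.foldl_append]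
      rw [hof]
      by_cases hy : y ∈ p
      · have hadd : PySem.Set.add (PySem.Set.ofList p) y = PySem.Set.ofList p := by
          simp [PySem.Set.add]; exact hy
        rw [hadd]
        refine List.Pairwise.imp_of_mem (fun {a b} ha hb r => ?_) ih
        have ha' : a ∈ p := by rwa [PySem.Set.mem_ofList] at ha
        have hb' : b ∈ p := by rwa [PySem.Set.mem_ofList] at hb
        rw [List.idxOf_append_of_mem ha', List.idxOf_append_of_mem hb']
        exact r
      · have hadd : PySem.Set.add (PySem.Set.ofList p) y = PySem.Set.ofList p ++ [y] := by
          simp [PySem.Set.add, hy]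
        rw [hadd, List.pairwise_append]
        refine ⟨List.Pairwise.imp_of_mem (fun {a b} ha hb r => ?_) ih, by simp, ?_⟩
        · have ha' : a ∈ p := by rwa [PySem.Set.mem_ofList] at ha
          have hb' : b ∈ p := by rwa [PySem.Set.mem_ofList] at hb
          rw [List.idxOf_append_of_mem ha', List.idxOf_append_of_mem hb']
          exact r
        · intro a ha b hb
          have hb' : b = y := by simpa using hb
          subst hb'
          have ha' : a ∈ p := by rwa [PySem.Set.mem_ofList] at ha
          rw [List.idxOf_append_of_mem ha', List.idxOf_append_of_notMem hy]
          have := List.idxOf_lt_length_of_mem ha'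
          simp
          omega

def pvF (casts : List String) (k : String) : String × Int := (k, ((pvN casts).count k : Int))

lemma pv_main (x : String) (t : List String) (fallback : Option String) :
    choose_best_aluminium_bozen_cast_py (x :: t) fallback
      = choose_best_aluminium_bozen_cast_py_alt (x :: t) fallback := by
  -- B reduces to a selection over the casts with the semantic composite key
  have hB : choose_best_aluminium_bozen_cast_py_alt (x :: t) fallback
      = some (pvSel pvGT4
          (pvRank ((PySem.List.enumerate (x :: t)).foldl pvFCp PySem.Dict.empty)
            ((PySem.List.enumerate (x :: t)).foldl pvFS PySem.Dict.empty)) x t) := by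
    unfold choose_best_aluminium_bozen_cast_py_alt
    simp only [pv_foldC_split]
    rfl
  have hrank : ∀ c ∈ x :: t,
      pvRank ((PySem.List.enumerate (x :: t)).foldl pvFCp PySem.Dict.empty)
        ((PySem.List.enumerate (x :: t)).foldl pvFS PySem.Dict.empty) c
      = pvKey (x :: t) c := by
    intro c hc
    have hkmem : pvNorm c ∈ pvN (x :: t) := List.mem_map_of_mem hc
    have hget : ((PySem.List.enumerate (x :: t)).foldl pvFS PySem.Dict.empty).get? (pvNorm c)
        = some (pvFst (x :: t) (pvNorm c)) := by
      rw [pv_fs (pvNorm c) (PySem.List.enumerate (x :: t)) PySem.Dict.empty]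
      simp only [PySem.Dict.get?_empty]
      rw [pv_find_enum (pvNorm c) (x :: t) 0, if_pos hkmem]
      simp [pvFst]
    have h1 : ((PySem.List.enumerate (x :: t)).foldl pvFCp PySem.Dict.empty).getD (pvNorm c) 0
        = pvCnt (x :: t) (pvNorm c) := by
      rw [pv_countsB, PySem.Dict.getD_counter]
      rfl
    have h2 : ((PySem.List.enumerate (x :: t)).foldl pvFS PySem.Dict.empty).getD (pvNorm c) 0
        = pvFst (x :: t) (pvNorm c) := by
      rw [PySem.Dict.getD_eq_get?_getD, hget]
      rfl
    show (_, (pvScore c).1, (pvScore c).2, _)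
        = (pvCnt (x :: t) (pvNorm c), (pvScore c).1, (pvScore c).2, -pvFst (x :: t) (pvNorm c))
    rw [h1, h2]
  have hBval : choose_best_aluminium_bozen_cast_py_alt (x :: t) fallback
      = some (pvSel pvGT4 (pvKey (x :: t)) x t) := by
    rw [hB]
    congr 1
    exact pvSel_congr pvGT4 _ _ t x
      (fun c hc => hrank c (List.mem_cons_of_mem _ hc)) (hrank x (List.mem_cons_self ..))
  -- A's counts dict: the dedup of normalized keys, with multiplicities
  have hitems : ((x :: t).foldl pvFC PySem.Dict.empty).items
      = (PySem.Set.ofList (pvN (x :: t))).map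
          (fun k => (k, ((pvN (x :: t)).count k : Int))) := by
    rw [pv_countsA, PySem.Dict.items_counter]
  have hxD : pvNorm x ∈ PySem.Set.ofList (pvN (x :: t)) := by
    rw [PySem.Set.mem_ofList]
    exact List.mem_map_of_mem (List.mem_cons_self ..)
  rcases hD : PySem.Set.ofList (pvN (x :: t)) with _ | ⟨dk, drest⟩
  · rw [hD] at hxD; cases hxD
  have hitems2 : ((x :: t).foldl pvFC PySem.Dict.empty).items
      = pvF (x :: t) dk :: drest.map (pvF (x :: t)) := by
    rw [hitems, hD, List.map_cons]
    rfl
  have hDmem : ∀ k ∈ dk :: drest, k ∈ pvN (x :: t) := by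
    intro k hk
    rw [← PySem.Set.mem_ofList (xs := pvN (x :: t)), hD]
    exact hk
  -- A reduces to a selection over the dict items
  have hA : choose_best_aluminium_bozen_cast_py (x :: t) fallback
      = some (((x :: t).foldl pvFP PySem.Dict.empty).getD
          (pvSel pvGT3
            (fun item => (item.2,
              pvScore (((x :: t).foldl pvFP PySem.Dict.empty).getD item.1 "")))
            (pvF (x :: t) dk) (drest.map (pvF (x :: t)))).1 "") := by
    unfold choose_best_aluminium_bozen_cast_py
    rw [if_neg (show ¬(x :: t) = [] by simp), pv_foldA_split]
    simp only [hitems2]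
    rfl
  -- replace A's dict-lookup key by its semantic value on the items
  have hfA : ∀ item ∈ pvF (x :: t) dk :: drest.map (pvF (x :: t)),
      (fun item : String × Int => (item.2,
          pvScore (((x :: t).foldl pvFP PySem.Dict.empty).getD item.1 ""))) item
        = pvI3 (x :: t) item := by
    intro item hit
    have hk1 : item.1 ∈ dk :: drest := by
      rw [← List.map_cons] at hit
      obtain ⟨k, hk, rfl⟩ := List.mem_map.mp hit
      exact hk
    have : ((x :: t).foldl pvFP PySem.Dict.empty).getD item.1 ""
        = pvRep (x :: t) item.1 := pv_getD_pref (hDmem _ hk1)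
    simp only [pvI3, this]
  have hAB3 : pvSel pvGT3
        (fun item : String × Int => (item.2,
          pvScore (((x :: t).foldl pvFP PySem.Dict.empty).getD item.1 "")))
        (pvF (x :: t) dk) (drest.map (pvF (x :: t)))
      = pvSel pvGT3 (pvI3 (x :: t)) (pvF (x :: t) dk) (drest.map (pvF (x :: t))) :=
    pvSel_congr pvGT3 _ _ _ _
      (fun c hc => hfA c (List.mem_cons_of_mem _ hc))
      (hfA _ (List.mem_cons_self ..))
  -- 3-component fold = 4-component fold (first-occurrence indices strictly increase)
  have hpwD : (dk :: drest).Pairwise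
      (fun a b => (pvN (x :: t)).idxOf a < (pvN (x :: t)).idxOf b) := by
    have h := pv_pairwise_idxOf (pvN (x :: t))
    rwa [hD] at h
  have hpwI : ((dk :: drest).map (pvF (x :: t))).Pairwise
      (fun u v => -pvFst (x :: t) v.1 < -pvFst (x :: t) u.1) := by
    rw [List.pairwise_map]
    refine hpwD.imp ?_
    intro a b hab
    simp only [pvF, pvFst]
    omega
  rw [List.map_cons] at hpwI
  rcases List.pairwise_cons.mp hpwI with ⟨hhead, htail⟩
  have hA34 : pvSel pvGT3 (pvI3 (x :: t)) (pvF (x :: t) dk) (drest.map (pvF (x :: t)))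
      = pvSel pvGT4 (pvIKey (x :: t)) (pvF (x :: t) dk) (drest.map (pvF (x :: t))) :=
    pv_fold34 (pvI3 (x :: t)) (fun item => -pvFst (x :: t) item.1)
      (drest.map (pvF (x :: t))) (pvF (x :: t) dk) hhead htail
  -- the two running maxima
  have hfindA := pvSel_find pvGT4 (pvIKey (x :: t)) pvGT4_irrefl pvGT4_trans pvGT4_conn
    (drest.map (pvF (x :: t))) (pvF (x :: t) dk)
  have hfindB := pvSel_find pvGT4 (pvKey (x :: t)) pvGT4_irrefl pvGT4_trans pvGT4_conn t x
  -- pvIKey of an item is the composite key of the group's representative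
  have hIK : ∀ k ∈ dk :: drest,
      pvIKey (x :: t) (pvF (x :: t) k) = pvKey (x :: t) (pvRep (x :: t) k)
        ∧ pvRep (x :: t) k ∈ x :: t := by
    intro k hk
    obtain ⟨hnr, hmr⟩ := pv_norm_rep (hDmem k hk)
    refine ⟨?_, hmr⟩
    simp only [pvIKey, pvKey, hnr]
    rfl
  -- every B key is bounded by the B maximum, every item key by the A maximum
  have hallB : ∀ c ∈ x :: t,
      pvGT4 (pvKey (x :: t) c) (pvKM pvGT4 (pvKey (x :: t) x) (t.map (pvKey (x :: t)))) = false := by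
    intro c hc
    rcases List.mem_cons.mp hc with rfl | hc'
    · exact pvKM_ge_init pvGT4 pvGT4_irrefl pvGT4_trans _ _
    · exact pvKM_ge_mem pvGT4 pvGT4_irrefl pvGT4_trans pvGT4_conn _ _ _
        (List.mem_map_of_mem hc')
  have hallA : ∀ item ∈ pvF (x :: t) dk :: drest.map (pvF (x :: t)),
      pvGT4 (pvIKey (x :: t) item)
        (pvKM pvGT4 (pvIKey (x :: t) (pvF (x :: t) dk))
          ((drest.map (pvF (x :: t))).map (pvIKey (x :: t)))) = false := by
    intro item hit
    rcases List.mem_cons.mp hit with rfl | hit'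
    · exact pvKM_ge_init pvGT4 pvGT4_irrefl pvGT4_trans _ _
    · exact pvKM_ge_mem pvGT4 pvGT4_irrefl pvGT4_trans pvGT4_conn _ _ _
        (List.mem_map_of_mem hit')
  -- cross bounds, hence the two maxima agree
  have hA_le_B : ∀ item ∈ pvF (x :: t) dk :: drest.map (pvF (x :: t)),
      pvGT4 (pvIKey (x :: t) item)
        (pvKM pvGT4 (pvKey (x :: t) x) (t.map (pvKey (x :: t)))) = false := by
    intro item hit
    rw [← List.map_cons] at hit
    obtain ⟨k, hk, rfl⟩ := List.mem_map.mp hit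
    obtain ⟨he, hm⟩ := hIK k hk
    rw [he]
    exact hallB _ hm
  have hB_le_A : ∀ c ∈ x :: t,
      pvGT4 (pvKey (x :: t) c)
        (pvKM pvGT4 (pvIKey (x :: t) (pvF (x :: t) dk))
          ((drest.map (pvF (x :: t))).map (pvIKey (x :: t)))) = false := by
    intro c hc
    have hkD : pvNorm c ∈ dk :: drest := by
      rw [← hD, PySem.Set.mem_ofList]
      exact List.mem_map_of_mem hc
    have hFk : pvF (x :: t) (pvNorm c) ∈ pvF (x :: t) dk :: drest.map (pvF (x :: t)) := by
      rw [← List.map_cons]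
      exact List.mem_map_of_mem hkD
    have hstep : pvGT4 (pvKey (x :: t) c) (pvIKey (x :: t) (pvF (x :: t) (pvNorm c))) = false := by
      show pvGT4
        (pvCnt (x :: t) (pvNorm c), (pvScore c).1, (pvScore c).2, -pvFst (x :: t) (pvNorm c))
        (pvCnt (x :: t) (pvNorm c),
          (pvScore (pvRep (x :: t) (pvNorm c))).1,
          (pvScore (pvRep (x :: t) (pvNorm c))).2, -pvFst (x :: t) (pvNorm c)) = false
      exact pvGT4_false_of_gt2_false _ _ _ _ _ _
        (pv_score_rep_max (pv_mem_group_self hc))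
    exact pvLe_trans pvGT4 pvGT4_trans pvGT4_conn hstep (hallA _ hFk)
  have hMAB : pvKM pvGT4 (pvIKey (x :: t) (pvF (x :: t) dk))
        ((drest.map (pvF (x :: t))).map (pvIKey (x :: t)))
      = pvKM pvGT4 (pvKey (x :: t) x) (t.map (pvKey (x :: t))) := by
    apply pvGT4_conn
    · rcases pvKM_mem pvGT4 ((drest.map (pvF (x :: t))).map (pvIKey (x :: t)))
          (pvIKey (x :: t) (pvF (x :: t) dk)) with h | h
      · rw [h]; exact hA_le_B _ (List.mem_cons_self ..)
      · obtain ⟨item, hitem, he⟩ := List.mem_map.mp h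
        rw [← he]
        exact hA_le_B item (List.mem_cons_of_mem _ hitem)
    · rcases pvKM_mem pvGT4 (t.map (pvKey (x :: t))) (pvKey (x :: t) x) with h | h
      · rw [h]; exact hB_le_A x (List.mem_cons_self ..)
      · obtain ⟨c, hcm, he⟩ := List.mem_map.mp h
        rw [← he]
        exact hB_le_A c (List.mem_cons_of_mem _ hcm)
  -- the item A selects
  have hbestmem := pvSel_mem pvGT4 (pvIKey (x :: t)) (drest.map (pvF (x :: t))) (pvF (x :: t) dk)
  obtain ⟨kstar, hkstarD, hbest⟩ : ∃ k ∈ dk :: drest,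
      pvF (x :: t) k = pvSel pvGT4 (pvIKey (x :: t)) (pvF (x :: t) dk) (drest.map (pvF (x :: t))) := by
    rw [← List.map_cons] at hbestmem
    obtain ⟨k, hk, he⟩ := List.mem_map.mp hbestmem
    exact ⟨k, hk, he⟩
  have hkstarN : kstar ∈ pvN (x :: t) := hDmem kstar hkstarD
  obtain ⟨hnr, hmr⟩ := pv_norm_rep hkstarN
  have hkeybest : pvIKey (x :: t)
        (pvSel pvGT4 (pvIKey (x :: t)) (pvF (x :: t) dk) (drest.map (pvF (x :: t))))
      = pvKM pvGT4 (pvIKey (x :: t) (pvF (x :: t) dk))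
          ((drest.map (pvF (x :: t))).map (pvIKey (x :: t))) :=
    pvSel_key pvGT4 (pvIKey (x :: t)) (drest.map (pvF (x :: t))) (pvF (x :: t) dk)
  -- the B maximum is the composite key of kstar's representative
  have hMrep : pvKM pvGT4 (pvKey (x :: t) x) (t.map (pvKey (x :: t)))
      = pvKey (x :: t) (pvRep (x :: t) kstar) := by
    rw [← hMAB, ← hkeybest, ← hbest]
    exact (hIK kstar hkstarD).1
  -- B's find? characterization rewritten towards the group of kstar
  have hcongr : ∀ z ∈ x :: t,
      (decide (pvKey (x :: t) z = pvKM pvGT4 (pvKey (x :: t) x) (t.map (pvKey (x :: t)))))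
        = ((pvNorm z == kstar) && decide (pvScore z = pvScore (pvRep (x :: t) kstar))) := by
    intro z hz
    rw [Bool.eq_iff_iff]
    simp only [decide_eq_true_eq, Bool.and_eq_true, beq_iff_eq]
    rw [hMrep]
    constructor
    · intro hzz
      have hzz' := hzz
      simp only [pvKey, Prod.mk.injEq] at hzz'
      obtain ⟨e1, e2, e3, e4⟩ := hzz'
      rw [hnr] at e4
      have hnz : pvNorm z = kstar :=
        pv_fst_inj (List.mem_map_of_mem hz) hkstarN (by omega)
      refine ⟨hnz, ?_⟩
      rw [Prod.ext_iff]
      exact ⟨e2, e3⟩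
    · rintro ⟨hn, hs⟩
      simp only [pvKey, hn, hs, hnr]
  have hfind2 : (x :: t).find?
        (fun z => decide (pvKey (x :: t) z
          = pvKM pvGT4 (pvKey (x :: t) x) (t.map (pvKey (x :: t)))))
      = some (pvRep (x :: t) kstar) := by
    rw [pv_find?_congr _ _ (x :: t) hcongr]
    have hfilter : (x :: t).find?
          (fun z => (pvNorm z == kstar) && decide (pvScore z = pvScore (pvRep (x :: t) kstar)))
        = (pvGroup (x :: t) kstar).find?
            (fun z => decide (pvScore z = pvScore (pvRep (x :: t) kstar))) :=
      (pv_find?_filter _ _ (x :: t)).symm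
    rw [hfilter]
    rcases hg : pvGroup (x :: t) kstar with _ | ⟨gx, g⟩
    · exact absurd hg (pv_group_ne_nil hkstarN)
    · have hrep : pvRep (x :: t) kstar = pvSel pvGT2 pvScore gx g := by simp [pvRep, hg]
      rw [hrep, pvSel_key pvGT2 pvScore g gx]
      exact pvSel_find pvGT2 pvScore pvGT2_irrefl pvGT2_trans pvGT2_conn g gx
  -- B selects exactly kstar's representative
  have hBsel : pvSel pvGT4 (pvKey (x :: t)) x t = pvRep (x :: t) kstar := by
    have h1 := hfindB
    rw [hfind2] at h1
    exact (Option.some.inj h1).symm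
  -- assemble
  rw [hA, hBval, hAB3, hA34, ← hbest, hBsel]
  show some (((x :: t).foldl pvFP PySem.Dict.empty).getD kstar "") = _
  rw [pv_getD_pref hkstarN]

-- ===== VERDICT (by name: the statement is the Claim_ definition above) =====
theorem choose_best_aluminium_bozen_cast_py_spec : Claim_equal_choose_best_aluminium_bozen_cast_py := by
  intro casts fallback _
  show choose_best_aluminium_bozen_cast_py casts fallback
      = choose_best_aluminium_bozen_cast_py_alt casts fallback
  rcases casts with _ | ⟨x, t⟩
  · rfl
  · exact pv_main x t fallback
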